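-- pv_equiv track=rewrite | github.com/Zonotora/adventofcode | 2021/python/04.py | check_bingo
-- ===== SOURCE A (Python) =====
-- def check_bingo(board, num):
--     for i in range(len(board)):
--         for j in range(len(board[i])):
--             if board[i][j] == num:
--                 board[i][j] = -1
--
--             if check_item(board[i]) or check_item(
--                 [board[k][j] for k in range(len(board))]
--             ):
--                 return board
--
-- def check_item(items):
--     return all([item == -1 for item in items])
-- ===== SOURCE B (Python) =====
-- def check_bingo(board, num):
--     n = len(board)
--     m = len(board[0]) if board else 0
--     rowcnt = [row.count(-1) for row in board]
--     colcnt = [[row[j] for row in board].count(-1) for j in range(m)]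
--     for i in range(n):
--         row = board[i]
--         for j in range(len(row)):
--             if row[j] == num and row[j] != -1:
--                 row[j] = -1
--                 rowcnt[i] += 1
--                 colcnt[j] += 1
--             if rowcnt[i] == len(row) or colcnt[j] == n:
--                 return board
-- ===== Notes on version B (the rewrite author's own statement) =====
-- stated objective: faster
-- what changed: Replaces the per-cell full row rescan and column-comprehension rescan (check_item) with per-row/per-column counters of -1 cells, seeded once and updated O(1) per marked cell, so each cell's win test is two counter comparisons instead of two O(n) scans.
-- outside the precondition, e.g. on check_bingo([[], [], [0, -1]], 0): A returns [[], [], [-1, -1]], B raises IndexError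
import Mathlib
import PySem

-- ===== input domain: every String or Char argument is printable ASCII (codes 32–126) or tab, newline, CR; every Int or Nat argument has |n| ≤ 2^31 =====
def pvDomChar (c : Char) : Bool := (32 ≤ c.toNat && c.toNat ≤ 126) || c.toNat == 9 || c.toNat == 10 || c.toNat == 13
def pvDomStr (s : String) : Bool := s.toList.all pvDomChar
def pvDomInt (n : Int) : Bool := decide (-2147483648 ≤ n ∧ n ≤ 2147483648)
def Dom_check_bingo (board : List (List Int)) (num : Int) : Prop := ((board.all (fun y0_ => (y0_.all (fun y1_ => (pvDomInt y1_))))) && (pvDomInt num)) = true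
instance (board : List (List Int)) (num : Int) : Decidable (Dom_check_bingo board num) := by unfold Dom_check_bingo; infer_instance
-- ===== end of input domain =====

-- B replaces A's per-cell O(n) row/column rescans by -1 counters per row and column,
-- seeded once and bumped when a cell is marked (O(n^2) instead of O(n^3) per call).
-- Both A and B mutate `board` in place (marking cells to -1); the equivalence proved
-- here is about the RETURN value only (B performs the same marking).

-- ===== PORT A =====
-- all indices reached by A's loops are in range under Pre_ (rectangular board),
-- so plain `getD` is an exact transliteration of Python indexing there.
def check_item (items : List Int) : Bool :=
  (items.map (fun item => item == -1)).all id

-- [board[k][j] for k in range(len(board))]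
def check_bingo_col (b : List (List Int)) (j : Nat) : List Int :=
  (List.range b.length).map (fun k => (b.getD k []).getD j 0)

-- inner `for j in range(len(board[i]))` loop; .inl r = `return r`, .inr b = fell through with state b
def check_bingo_loopJ (num : Int) (i : Nat) : List Nat → List (List Int) → (List (List Int)) ⊕ (List (List Int))
  | [], b => .inr b
  | j :: rest, b =>
    let row := b.getD i []
    let b' := if row.getD j 0 == num then b.set i (row.set j (-1)) else b
    if check_item (b'.getD i []) || check_item (check_bingo_col b' j) then .inl b'
    else check_bingo_loopJ num i rest b'

-- outer `for i in range(len(board))` loop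
def check_bingo_loopI (num : Int) : List Nat → List (List Int) → Option (List (List Int))
  | [], _ => none
  | i :: rest, b =>
    match check_bingo_loopJ num i (List.range ((b.getD i []).length)) b with
    | .inl r => some r
    | .inr b' => check_bingo_loopI num rest b'

def check_bingo (board : List (List Int)) (num : Int) : Option (List (List Int)) :=
  check_bingo_loopI num (List.range board.length) board

-- ===== PORT B =====
-- number of -1 entries of a row, as a Python int: row.count(-1)
def altRowCnt (row : List Int) : Int := (row.count (-1) : Int)

-- [row[j] for row in board]
def altCol (b : List (List Int)) (j : Nat) : List Int := b.map (fun row => row.getD j 0)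

-- inner loop of B: carries board, rowcnt, colcnt
def check_bingo_altJ (num : Int) (n : Int) (i : Nat) :
    List Nat → List (List Int) → List Int → List Int → (List (List Int)) ⊕ (List (List Int) × List Int × List Int)
  | [], b, rc, cc => .inr (b, rc, cc)
  | j :: rest, b, rc, cc =>
    let row := b.getD i []
    let v := row.getD j 0
    if v == num && !(v == -1) then
      let b' := b.set i (row.set j (-1))
      let rc' := rc.set i (rc.getD i 0 + 1)
      let cc' := cc.set j (cc.getD j 0 + 1)
      if rc'.getD i 0 == (((b'.getD i []).length : Nat) : Int) || cc'.getD j 0 == n then .inl b'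
      else check_bingo_altJ num n i rest b' rc' cc'
    else
      if rc.getD i 0 == (((b.getD i []).length : Nat) : Int) || cc.getD j 0 == n then .inl b
      else check_bingo_altJ num n i rest b rc cc

def check_bingo_altI (num : Int) (n : Int) :
    List Nat → List (List Int) → List Int → List Int → Option (List (List Int))
  | [], _, _, _ => none
  | i :: rest, b, rc, cc =>
    match check_bingo_altJ num n i (List.range ((b.getD i []).length)) b rc cc with
    | .inl r => some r
    | .inr (b', rc', cc') => check_bingo_altI num n rest b' rc' cc'

def check_bingo_alt (board : List (List Int)) (num : Int) : Option (List (List Int)) :=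
  let n := board.length
  let m := (board.headD []).length
  let rowcnt := board.map altRowCnt
  let colcnt := (List.range m).map (fun j => altRowCnt (altCol board j))
  check_bingo_altI num (n : Int) (List.range n) board rowcnt colcnt

-- ===== PRECONDITION & SPEC =====
-- Pre_ excludes ragged boards (rows of unequal length): on those A's column
-- comprehension indexes past the end of shorter rows, so A either raises
-- IndexError or happens to return before reaching the bad column, and B's
-- column counters raise IndexError at different points; the behaviour there
-- is an artefact of traversal order, not part of the bingo task.
def Pre_check_bingo (board : List (List Int)) (num : Int) : Prop :=
  ∀ row ∈ board, row.length = (board.headD []).length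
instance (board : List (List Int)) (num : Int) : Decidable (Pre_check_bingo board num) := by
  unfold Pre_check_bingo; infer_instance

def pvWitness_check_bingo : List (List Int) × Int := ([[1, 2], [3, 4]], 2)

def Spec_check_bingo (board : List (List Int)) (num : Int) (out : Option (List (List Int))) : Prop := out = check_bingo_alt board num
instance (board : List (List Int)) (num : Int) (out : Option (List (List Int))) : Decidable (Spec_check_bingo board num out) := by unfold Spec_check_bingo; infer_instance

-- ===== CLAIM (what is proved, stated in full; the proofs are below) =====
def Claim_equal_check_bingo : Prop := ∀ (board : List (List Int)) (num : Int), Dom_check_bingo board num → Pre_check_bingo board num → Spec_check_bingo board num (check_bingo board num)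

-- ===== LEMMAS AND PROOFS =====

-- setting an element to the value it already has is a no-op
theorem pv_set_getD_self {α : Type} (l : List α) (j : Nat) (d : α) (hj : j < l.length) :
    l.set j (l.getD j d) = l := by
  rw [List.getD_eq_getElem l d hj]; exact List.set_getElem_self hj

-- A's column list equals B's column list
theorem pv_col_eq (b : List (List Int)) (j : Nat) : check_bingo_col b j = altCol b j := by
  unfold check_bingo_col altCol
  apply List.ext_getElem
  · simp
  · intro k h1 h2
    simp only [List.getElem_map, List.getElem_range]
    rw [List.getD_eq_getElem b [] (by simpa using h2)]

-- check_item is the counter test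
theorem pv_check_item_eq (items : List Int) :
    check_item items = (altRowCnt items == ((items.length : Nat) : Int)) := by
  unfold check_item altRowCnt
  have h1 : (items.map (fun item => item == -1)).all id = items.all (fun item => item == -1) := by
    simp [List.all_map]
  rw [h1]
  by_cases h : ∀ x ∈ items, x = -1
  · have hc : items.count (-1) = items.length := List.count_eq_length.mpr (by
      intro x hx; exact (h x hx).symm)
    have : items.all (fun item => item == -1) = true := by
      simp only [List.all_eq_true]; intro x hx; simpa using h x hx
    rw [this, hc]; simp
  · have hc : items.count (-1) ≠ items.length := by
      intro hcc; exact h (fun x hx => (List.count_eq_length.mp hcc x hx).symm)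
    have hall : items.all (fun item => item == -1) = false := by
      rw [← Bool.not_eq_true]; simp only [List.all_eq_true]
      intro hx; exact h (fun x h2 => by simpa using hx x h2)
    rw [hall]
    have : (items.count (-1) : Int) ≠ ((items.length : Nat) : Int) := by
      exact_mod_cast hc
    simp [this]

-- counting -1 after marking a non(-1) cell to -1
theorem pv_count_mark (l : List Int) (j : Nat) (hj : j < l.length) (hne : l.getD j 0 ≠ -1) :
    altRowCnt (l.set j (-1)) = altRowCnt l + 1 := by
  unfold altRowCnt
  have hge : l[j] ≠ (-1 : Int) := by rwa [List.getD_eq_getElem l 0 hj] at hne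
  rw [List.count_set (a := (-1 : Int)) (b := (-1 : Int)) (l := l) (i := j) hj]
  have hb : (l[j] == (-1 : Int)) = false := by simpa using hge
  simp [hb]

-- the simulation relation between A's and B's inner-loop outcomes
def pvRel (m n : Nat) :
    (List (List Int)) ⊕ (List (List Int)) →
    (List (List Int)) ⊕ (List (List Int) × List Int × List Int) → Prop
  | .inl r, .inl r' => r = r'
  | .inr b1, .inr (b2, rc2, cc2) =>
      b2 = b1 ∧ (∀ row ∈ b1, row.length = m) ∧ b1.length = n ∧
      rc2 = b1.map altRowCnt ∧ cc2 = (List.range m).map (fun j => altRowCnt (altCol b1 j))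
  | _, _ => False

theorem pvRel_ite (m n : Nat) (c : Prop) [Decidable c]
    (x y : (List (List Int)) ⊕ (List (List Int)))
    (x' y' : (List (List Int)) ⊕ (List (List Int) × List Int × List Int))
    (hx : pvRel m n x x') (hy : pvRel m n y y') :
    pvRel m n (if c then x else y) (if c then x' else y') := by
  by_cases h : c
  · rw [if_pos h, if_pos h]; exact hx
  · rw [if_neg h, if_neg h]; exact hy

-- the inner-loop simulation invariant: B's counters track exactly the quantities
-- A recomputes by scanning, so the two loops mark the same cells and return together
theorem pv_loopJ_sim (num : Int) (m n : Nat) (i : Nat) (js : List Nat) :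
    ∀ (b : List (List Int)) (rc cc : List Int),
      (∀ row ∈ b, row.length = m) →
      i < b.length →
      b.length = n →
      rc = b.map altRowCnt →
      cc = (List.range m).map (fun j => altRowCnt (altCol b j)) →
      (∀ j ∈ js, j < m) →
      pvRel m n (check_bingo_loopJ num i js b) (check_bingo_altJ num (n : Int) i js b rc cc) := by
  induction js with
  | nil =>
    intro b rc cc hrect hi hn hrc hcc _
    exact ⟨rfl, hrect, hn, hrc, hcc⟩
  | cons j rest ih =>
    intro b rc cc hrect hi hn hrc hcc hjs
    subst hrc; subst hcc
    have hj : j < m := hjs j (by simp)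
    have hjs' : ∀ j' ∈ rest, j' < m := fun j' hj' => hjs j' (by simp [hj'])
    have hbi : b.getD i [] = b[i] := List.getD_eq_getElem b [] hi
    have hrow : (b.getD i []).length = m := by
      rw [hbi]; exact hrect _ (List.getElem_mem hi)
    have hrcget : (b.map altRowCnt).getD i 0 = altRowCnt (b.getD i []) := by
      rw [List.getD_eq_getElem _ 0 (by simpa using hi), List.getElem_map, hbi]
    have hccget : ((List.range m).map (fun j' => altRowCnt (altCol b j'))).getD j 0 =
        altRowCnt (altCol b j) := by
      rw [List.getD_eq_getElem _ 0 (by simpa using hj)]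
      simp
    have hcolgetD : ∀ k : Nat, (altCol b k).getD i 0 = (b.getD i []).getD k 0 := by
      intro k
      rw [List.getD_eq_getElem _ 0 (by simpa [altCol] using hi), hbi]
      simp [altCol]
    have hcollen : ∀ k : Nat, (altCol b k).length = b.length := by
      intro k; simp [altCol]
    by_cases hmark : (b.getD i []).getD j 0 = num ∧ (b.getD i []).getD j 0 ≠ (-1 : Int)
    · -- a cell is marked: both loops move to the board b.set i (row.set j (-1))
      obtain ⟨h1, h2⟩ := hmark
      have h2' : num ≠ (-1 : Int) := h1 ▸ h2
      have hA2 : (((b.getD i []).getD j 0 == num) = true) := by rw [h1]; simp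
      have hB2 : (((b.getD i []).getD j 0 == num && !((b.getD i []).getD j 0 == -1)) = true) := by
        rw [h1]; simp [h2']
      have hjrow : j < (b.getD i []).length := by rw [hrow]; exact hj
      have hX : ∀ r ∈ b.set i ((b.getD i []).set j (-1)), r.length = m := by
        intro r hr
        rcases List.mem_or_eq_of_mem_set hr with h | h
        · exact hrect r h
        · subst h; rw [List.length_set]; exact hrow
      have hXlen : (b.set i ((b.getD i []).set j (-1))).length = n := by
        rw [List.length_set]; exact hn
      have hXi : (b.set i ((b.getD i []).set j (-1))).getD i [] = (b.getD i []).set j (-1) := by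
        rw [List.getD_eq_getElem _ [] (by simpa using hi)]
        simp
      have hrc' : (b.map altRowCnt).set i ((b.map altRowCnt).getD i 0 + 1) =
          (b.set i ((b.getD i []).set j (-1))).map altRowCnt := by
        rw [List.map_set, hrcget, pv_count_mark (b.getD i []) j hjrow h2]
      have hcolX : ∀ k : Nat, altCol (b.set i ((b.getD i []).set j (-1))) k =
          (altCol b k).set i (((b.getD i []).set j (-1)).getD k 0) := by
        intro k; unfold altCol; rw [List.map_set]
      have hcolXj : altCol (b.set i ((b.getD i []).set j (-1))) j = (altCol b j).set i (-1) := by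
        rw [hcolX j, List.getD_eq_getElem _ 0 (by simpa using hjrow)]
        simp
      have hccXj : altRowCnt (altCol (b.set i ((b.getD i []).set j (-1))) j) =
          altRowCnt (altCol b j) + 1 := by
        rw [hcolXj]
        exact pv_count_mark (altCol b j) i (by rw [hcollen j]; exact hi)
          (by rw [hcolgetD j]; exact h2)
      have hcc' : ((List.range m).map (fun j' => altRowCnt (altCol b j'))).set j
            (((List.range m).map (fun j' => altRowCnt (altCol b j'))).getD j 0 + 1) =
          (List.range m).map (fun j' => altRowCnt (altCol (b.set i ((b.getD i []).set j (-1))) j')) := by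
        apply List.ext_getElem
        · simp
        · intro k hk1 hk2
          have hkm : k < m := by simpa using hk2
          rw [List.getElem_set]
          have hrhs : ((List.range m).map
              (fun j' => altRowCnt (altCol (b.set i ((b.getD i []).set j (-1))) j')))[k]'hk2 =
              altRowCnt (altCol (b.set i ((b.getD i []).set j (-1))) k) := by simp
          rw [hrhs]
          by_cases hkj : j = k
          · subst hkj
            rw [if_pos rfl, hccget, hccXj]
          · rw [if_neg hkj, hcolX k]
            have hkval : ((b.getD i []).set j (-1)).getD k 0 = (b.getD i []).getD k 0 := by
              by_cases hkr : k < (b.getD i []).length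
              · rw [List.getD_eq_getElem _ 0 (by simpa using hkr), List.getD_eq_getElem _ 0 hkr]
                simp [hkj]
              · rw [List.getD_eq_default _ 0 (by simpa using Nat.le_of_not_lt hkr),
                    List.getD_eq_default _ 0 (Nat.le_of_not_lt hkr)]
            rw [hkval, ← hcolgetD k,
                pv_set_getD_self (altCol b k) i 0 (by rw [hcollen k]; exact hi)]
            simp
      -- the two guards coincide on the new state
      have hguard :
          (check_item ((b.set i ((b.getD i []).set j (-1))).getD i []) ||
           check_item (check_bingo_col (b.set i ((b.getD i []).set j (-1))) j)) =
          (((b.map altRowCnt).set i ((b.map altRowCnt).getD i 0 + 1)).getD i 0 ==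
             ((((b.set i ((b.getD i []).set j (-1))).getD i []).length : Nat) : Int) ||
           (((List.range m).map (fun j' => altRowCnt (altCol b j'))).set j
              (((List.range m).map (fun j' => altRowCnt (altCol b j'))).getD j 0 + 1)).getD j 0 ==
             ((n : Nat) : Int)) := by
        congr 1
        · rw [pv_check_item_eq]
          congr 1
          rw [hrc', List.getD_eq_getElem _ 0 (by simpa using hi), List.getElem_map,
              List.getElem_set, if_pos rfl, hXi]
        · rw [pv_check_item_eq, pv_col_eq]
          congr 1
          · rw [hcc', List.getD_eq_getElem _ 0 (by simpa using hj)]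
            simp
          · rw [hcolX j, List.length_set, hcollen j, hn]
      simp only [check_bingo_loopJ, check_bingo_altJ]
      rw [if_pos hB2, if_pos hA2, hguard]
      exact pvRel_ite m n _ _ _ _ _ rfl
        (ih (b.set i ((b.getD i []).set j (-1))) _ _ hX
          (by rw [List.length_set]; exact hi) hXlen hrc' hcc' hjs')
    · -- no mark: B leaves all state alone, and A's optional set is a no-op
      have hB2 : (((b.getD i []).getD j 0 == num && !((b.getD i []).getD j 0 == -1)) = false) := by
        by_cases h1 : (b.getD i []).getD j 0 = num
        · have h2 : (b.getD i []).getD j 0 = (-1 : Int) := by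
            by_contra h2; exact hmark ⟨h1, h2⟩
          rw [h2]; simp
        · rw [Bool.and_eq_false_iff]
          left
          rw [beq_eq_false_iff_ne]
          exact h1
      have hAeq : (if (((b.getD i []).getD j 0 == num) = true)
            then b.set i ((b.getD i []).set j (-1)) else b) = b := by
        by_cases h1 : (b.getD i []).getD j 0 = num
        · have h2 : (b.getD i []).getD j 0 = (-1 : Int) := by
            by_contra h2; exact hmark ⟨h1, h2⟩
          rw [if_pos (by rw [h1]; simp)]
          have hset : (b.getD i []).set j (-1) = b.getD i [] := by
            have := pv_set_getD_self (b.getD i []) j 0 (by rw [hrow]; exact hj)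
            rwa [h2] at this
          rw [hset, hbi]
          exact List.set_getElem_self hi
        · rw [if_neg (by simpa using h1)]
      have hguard :
          (check_item (b.getD i []) || check_item (check_bingo_col b j)) =
          ((b.map altRowCnt).getD i 0 == (((b.getD i []).length : Nat) : Int) ||
           ((List.range m).map (fun j' => altRowCnt (altCol b j'))).getD j 0 == ((n : Nat) : Int)) := by
        congr 1
        · rw [pv_check_item_eq, hrcget]
        · rw [pv_check_item_eq, pv_col_eq, hccget, hcollen j, hn]
      simp only [check_bingo_loopJ, check_bingo_altJ]
      rw [hAeq, hguard,
          if_neg (show ¬((((b.getD i []).getD j 0 == num) && !((b.getD i []).getD j 0 == -1)) = true) by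
            rw [hB2]; simp)]
      exact pvRel_ite m n _ _ _ _ _ rfl (ih b _ _ hrect hi hn rfl rfl hjs')


-- the outer-loop simulation
theorem pv_loopI_sim (num : Int) (m n : Nat) (is : List Nat) :
    ∀ (b : List (List Int)) (rc cc : List Int),
      (∀ row ∈ b, row.length = m) →
      (∀ i ∈ is, i < b.length) →
      b.length = n →
      rc = b.map altRowCnt →
      cc = (List.range m).map (fun j => altRowCnt (altCol b j)) →
      check_bingo_loopI num is b = check_bingo_altI num (n : Int) is b rc cc := by
  induction is with
  | nil => intro b rc cc _ _ _ _ _; rfl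
  | cons i rest ih =>
    intro b rc cc hrect his hn hrc hcc
    have hi : i < b.length := his i (by simp)
    have hrow : (b.getD i []).length = m := by
      rw [List.getD_eq_getElem b [] hi]; exact hrect _ (List.getElem_mem hi)
    have hjs : ∀ j ∈ List.range ((b.getD i []).length), j < m := by
      intro j hj; rw [← hrow]; exact List.mem_range.mp hj
    have hsim := pv_loopJ_sim num m n i (List.range ((b.getD i []).length)) b rc cc hrect hi hn hrc hcc hjs
    simp only [check_bingo_loopI, check_bingo_altI]
    cases hA : check_bingo_loopJ num i (List.range ((b.getD i []).length)) b with
    | inl r =>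
      cases hB : check_bingo_altJ num (n : Int) i (List.range ((b.getD i []).length)) b rc cc with
      | inl r' => rw [hA, hB] at hsim; simp only [pvRel] at hsim; simp only [hsim]
      | inr s => rw [hA, hB] at hsim; simp only [pvRel] at hsim
    | inr b1 =>
      cases hB : check_bingo_altJ num (n : Int) i (List.range ((b.getD i []).length)) b rc cc with
      | inl r' => rw [hA, hB] at hsim; simp only [pvRel] at hsim
      | inr s =>
        obtain ⟨b2, rc2, cc2⟩ := s
        rw [hA, hB] at hsim
        obtain ⟨hbeq, hrect1, hlen1, hrc1, hcc1⟩ := hsim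
        subst hbeq
        exact ih b2 rc2 cc2 hrect1
          (fun i' hi' => by rw [hlen1, ← hn]; exact his i' (by simp [hi']))
          hlen1 hrc1 hcc1

-- ===== VERDICT (by name: the statement is the Claim_ definition above) =====
theorem check_bingo_spec : Claim_equal_check_bingo := by
  intro board num _ hpre
  unfold Spec_check_bingo check_bingo check_bingo_alt
  exact pv_loopI_sim num ((board.headD []).length) board.length (List.range board.length)
    board _ _ hpre (fun i hi => List.mem_range.mp hi) rfl rfl rfl
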